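-- pv_equiv track=rewrite | github.com/JamesMCo/Advent-Of-Code | 2025/06/Part2.py | solve
-- ===== SOURCE A (Python) =====
-- from itertools import zip_longest
-- from math import prod
--
-- def solve(puzzle_input: list[str]) -> int:
--     grand_total: int = 0
--
--     nums: list[int] = []
--     op: str = ""
--
--     def calculate():
--         match op:
--             case "+":
--                 return sum(nums)
--             case "*":
--                 return prod(nums)
--             case _:
--                 return 0
--
--     for cols in zip_longest(*puzzle_input, fillvalue=" "):
--         if all(c == " " for c in cols):
--             grand_total += calculate()
--             nums = []
--             op = ""
--         else:
--             current_num: str = ""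
--             for i, c in enumerate(cols[:-1]):
--                 if c != " ":
--                     current_num += c
--             if current_num != "":
--                 nums.append(int(current_num))
--
--             if cols[-1] != " ":
--                 op = cols[-1]
--     grand_total += calculate()
--
--     return grand_total
-- ===== SOURCE B (Python) =====
-- from itertools import zip_longest
-- from math import prod
--
-- def solve(puzzle_input: list[str]) -> int:
--     # Two-phase: transpose once, split the columns into blocks at all-space
--     # columns, then evaluate each block independently and add the results.
--     blocks = [[]]
--     for col in zip_longest(*puzzle_input, fillvalue=" "):
--         if all(c == " " for c in col):
--             blocks.append([])
--         else:
--             blocks[-1].append(col)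
--     total = 0
--     for block in blocks:
--         nums = [int(s) for s in ("".join(c for c in col[:-1] if c != " ") for col in block) if s]
--         op = ""
--         for col in block:
--             if col[-1] != " ":
--                 op = col[-1]
--         total += sum(nums) if op == "+" else prod(nums) if op == "*" else 0
--     return total
-- ===== Notes on version B (the rewrite author's own statement) =====
-- stated objective: alternative
-- what changed: A evaluates everything in one stateful sweep over the transposed columns (accumulator nums/op reset at blank columns); B first splits the column list into blocks delimited by all-space columns and then evaluates each block independently (collect its numbers, take its last operator, sum/prod) and adds the block results.
import Mathlib
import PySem

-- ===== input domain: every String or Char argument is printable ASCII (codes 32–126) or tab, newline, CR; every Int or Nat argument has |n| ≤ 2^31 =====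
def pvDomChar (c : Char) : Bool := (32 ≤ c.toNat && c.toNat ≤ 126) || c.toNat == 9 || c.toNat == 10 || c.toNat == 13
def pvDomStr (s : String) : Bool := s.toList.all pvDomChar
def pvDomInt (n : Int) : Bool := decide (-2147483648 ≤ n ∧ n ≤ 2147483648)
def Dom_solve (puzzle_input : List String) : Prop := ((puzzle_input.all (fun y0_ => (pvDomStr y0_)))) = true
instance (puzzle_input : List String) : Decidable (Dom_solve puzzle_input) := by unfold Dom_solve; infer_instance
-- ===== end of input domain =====

-- B is the same task decomposed in two phases (split columns into blocks, then
-- evaluate each block independently); objective: alternative decomposition, not speed.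

-- Shared transposition: zip_longest(*puzzle_input, fillvalue=" ") as a list of columns.
def pvCols (puzzle_input : List String) : List (List Char) :=
  (List.range ((puzzle_input.map (fun s => s.toList.length)).foldr max 0)).map
    (fun j => puzzle_input.map (fun s => s.toList.getD j ' '))

-- ===== PORT A =====
-- calculate(): sum for "+", prod for "*", else 0 (op kept as the string's char list)
def pvCalc (op : List Char) (nums : List Int) : Int :=
  if op = ['+'] then nums.sum
  else if op = ['*'] then nums.prod
  else 0

-- A's single loop over the columns, carrying (grand_total, nums, op).
def pvLoopA : List (List Char) → Int → List Int → List Char → Int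
  | [], gt, nums, op => gt + pvCalc op nums
  | col :: rest, gt, nums, op =>
    if col.all (fun c => c = ' ') then
      pvLoopA rest (gt + pvCalc op nums) [] []
    else
      -- current_num built char by char from cols[:-1]
      let cur := col.dropLast.foldl (fun acc c => if c ≠ ' ' then acc ++ [c] else acc) []
      let nums' := if cur ≠ [] then nums ++ [(PySem.Int.ofChars? cur).getD 0] else nums
      let op' := if col.getLastD ' ' ≠ ' ' then [col.getLastD ' '] else op
      pvLoopA rest gt nums' op'

def solve (puzzle_input : List String) : Int :=
  pvLoopA (pvCols puzzle_input) 0 [] []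

-- ===== PORT B =====
-- Phase 1: split the column list into blocks delimited by all-space columns.
def pvSplit : List (List Char) → List (List Char) × List (List (List Char))
  | [] => ([], [])
  | col :: rest =>
    let r := pvSplit rest
    if col.all (fun c => c = ' ') then ([], r.1 :: r.2) else (col :: r.1, r.2)

-- the integer a block column contributes, if any
def pvParseCol? (col : List Char) : Option Int :=
  let s := col.dropLast.filter (fun c => c ≠ ' ')
  if s = [] then none else some ((PySem.Int.ofChars? s).getD 0)

-- Phase 2: evaluate one block: its numbers and its last non-space operator char.
def pvEvalBlock (b : List (List Char)) : Int :=
  pvCalc (b.foldl (fun op col => if col.getLastD ' ' ≠ ' ' then [col.getLastD ' '] else op) [])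
    (b.filterMap pvParseCol?)

def solve_alt (puzzle_input : List String) : Int :=
  let s := pvSplit (pvCols puzzle_input)
  pvEvalBlock s.1 + (s.2.map pvEvalBlock).sum

-- ===== PRECONDITION & SPEC =====
-- Pre_ excludes exactly the inputs where Python's int() raises ValueError in A
-- (a column whose joined non-space characters above the last row are not a valid integer literal).
def Pre_solve (puzzle_input : List String) : Prop :=
  ∀ col ∈ pvCols puzzle_input,
    (col.dropLast.filter (fun c => c ≠ ' ')) = [] ∨
      (PySem.Int.ofChars? (col.dropLast.filter (fun c => c ≠ ' '))).isSome = true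
instance (puzzle_input : List String) : Decidable (Pre_solve puzzle_input) := by unfold Pre_solve; infer_instance
def pvWitness_solve : List String := ["12 34", "56 78", " +  *"]
def Spec_solve (puzzle_input : List String) (out : Int) : Prop := out = solve_alt puzzle_input
instance (puzzle_input : List String) (out : Int) : Decidable (Spec_solve puzzle_input out) := by unfold Spec_solve; infer_instance

-- ===== CLAIM (what is proved, stated in full; the proofs are below) =====
def Claim_equal_solve : Prop := ∀ (puzzle_input : List String), Dom_solve puzzle_input → Pre_solve puzzle_input → Spec_solve puzzle_input (solve puzzle_input)

-- ===== LEMMAS AND PROOFS =====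

-- the op-update step shared by both ports
lemma pvLoopA_split (cs : List (List Char)) : ∀ (gt : Int) (nums : List Int) (op : List Char),
    pvLoopA cs gt nums op =
      gt + pvCalc ((pvSplit cs).1.foldl (fun op col => if col.getLastD ' ' ≠ ' ' then [col.getLastD ' '] else op) op)
            (nums ++ (pvSplit cs).1.filterMap pvParseCol?) +
        ((pvSplit cs).2.map pvEvalBlock).sum := by
  induction cs with
  | nil => intro gt nums op; simp [pvLoopA, pvSplit]
  | cons col rest ih =>
    intro gt nums op
    by_cases hb : col.all (fun c => c = ' ')
    · simp only [pvLoopA, pvSplit, hb, if_pos]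
      rw [ih]
      simp [pvEvalBlock]
      ring
    · simp only [pvLoopA, pvSplit, hb, if_neg, Bool.not_eq_true]
      rw [ih]
      simp only [List.foldl_cons, List.filterMap_cons]
      rw [PySem.List.foldl_append_ite_eq_filter]
      simp only [List.nil_append]
      by_cases hc : List.filter (fun c : Char => decide (c ≠ ' ')) col.dropLast = []
      · rw [if_neg (not_not_intro hc),
            show pvParseCol? col = none by simp only [pvParseCol?]; rw [if_pos hc]]
      · rw [if_pos hc,
            show pvParseCol? col =
                some ((PySem.Int.ofChars? (List.filter (fun c : Char => decide (c ≠ ' ')) col.dropLast)).getD 0) by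
              simp only [pvParseCol?]; rw [if_neg hc]]
        simp

-- ===== VERDICT (by name: the statement is the Claim_ definition above) =====
theorem solve_spec : Claim_equal_solve := by
  intro pi _ _
  unfold Spec_solve solve solve_alt
  rw [pvLoopA_split]
  simp [pvEvalBlock]
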